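-- pv_equiv track=rewrite | github.com/w1zZzyy/Attempt101 | src/services/third_party/userver/core/functional_tests/basic_chaos/tests-nonchaos/handlers/test_log_request_headers.py | _contains_ordered_substrings
-- ===== SOURCE A (Python) =====
-- def _contains_ordered_substrings(string, expected_ordered_substrings):
--     current_index = 0
--     for substring in expected_ordered_substrings:
--         current_index = string.find(substring, current_index)
--         if current_index == -1:
--             return False
--         current_index += len(substring)
--     return True
-- ===== SOURCE B (Python) =====
-- import re
--
--
-- def _contains_ordered_substrings(string, expected_ordered_substrings):
--     pattern = '.*?'.join(re.escape(s) for s in expected_ordered_substrings)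
--     return bool(re.search(pattern, string, re.DOTALL))
-- ===== Notes on version B (the rewrite author's own statement) =====
-- stated objective: idiomatic
-- what changed: Replaces the explicit find-loop with index bookkeeping by one regex built from the escaped substrings joined with lazy gaps ('.*?', DOTALL), letting re.search do the ordered placement.
import Mathlib
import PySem

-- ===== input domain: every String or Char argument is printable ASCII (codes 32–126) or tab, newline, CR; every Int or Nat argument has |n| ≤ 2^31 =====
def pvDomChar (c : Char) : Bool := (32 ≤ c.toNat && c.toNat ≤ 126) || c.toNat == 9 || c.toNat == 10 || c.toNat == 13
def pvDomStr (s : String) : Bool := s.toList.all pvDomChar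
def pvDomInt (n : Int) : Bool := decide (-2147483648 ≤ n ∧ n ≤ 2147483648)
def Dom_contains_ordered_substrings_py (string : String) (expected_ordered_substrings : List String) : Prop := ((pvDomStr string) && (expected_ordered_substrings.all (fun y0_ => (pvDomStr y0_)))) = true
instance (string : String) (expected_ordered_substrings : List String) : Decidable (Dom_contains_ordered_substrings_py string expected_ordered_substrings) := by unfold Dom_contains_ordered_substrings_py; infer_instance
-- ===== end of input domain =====

-- B replaces A's explicit find-loop with one regex of the escaped substrings joined by lazy
-- gaps ('.*?', DOTALL); objective: idiomatic, same result, no speed claim.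

-- ===== PORT A =====
-- literal port of A's loop: current_index updated by string.find(substring, current_index)
def pvALoop (string : String) (subs : List String) (current_index : Int) : Bool :=
  match subs with
  | [] => true
  | substring :: rest =>
    let ci := PySem.Str.findFrom string substring current_index
    if ci = -1 then false
    else pvALoop string rest (ci + (PySem.Str.len substring : Int))

def contains_ordered_substrings_py (string : String) (expected_ordered_substrings : List String) : Bool :=
  pvALoop string expected_ordered_substrings 0

-- ===== PORT B =====
-- hand port of re.search(pattern, string, re.DOTALL) for B's pattern, which is the escaped
-- literals joined by '.*?': a backtracking matcher — try the next literal at the current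
-- position and lazily grow the gap (advance one char, keeping the same pattern) otherwise.
-- Exact for this pattern shape: re.escape-d literals match themselves and '.*?' with DOTALL
-- matches an arbitrary gap, lazily.
def pvReSearchLits (text : List Char) (lits : List (List Char)) : Bool :=
  match lits, text with
  | [], _ => true
  | lit :: rest, [] => lit.isPrefixOf [] && pvReSearchLits [] rest
  | lit :: rest, c :: t =>
    (lit.isPrefixOf (c :: t) && pvReSearchLits ((c :: t).drop lit.length) rest) ||
    pvReSearchLits t (lit :: rest)
termination_by text.length + lits.length
decreasing_by
  all_goals (simp [List.length_drop] <;> omega)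

def contains_ordered_substrings_py_alt (string : String) (expected_ordered_substrings : List String) : Bool :=
  pvReSearchLits string.toList (expected_ordered_substrings.map String.toList)

-- ===== PRECONDITION & SPEC =====
def Spec_contains_ordered_substrings_py (string : String) (expected_ordered_substrings : List String) (out : Bool) : Prop := out = contains_ordered_substrings_py_alt string expected_ordered_substrings
instance (string : String) (expected_ordered_substrings : List String) (out : Bool) : Decidable (Spec_contains_ordered_substrings_py string expected_ordered_substrings out) := by unfold Spec_contains_ordered_substrings_py; infer_instance

-- ===== CLAIM (what is proved, stated in full; the proofs are below) =====
def Claim_equal_contains_ordered_substrings_py : Prop := ∀ (string : String) (expected_ordered_substrings : List String), Dom_contains_ordered_substrings_py string expected_ordered_substrings → Spec_contains_ordered_substrings_py string expected_ordered_substrings (contains_ordered_substrings_py string expected_ordered_substrings)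

-- ===== LEMMAS AND PROOFS =====

-- the common specification: the literals occur in order, disjointly, left to right
def pvOrdered : List Char → List (List Char) → Prop
  | _, [] => True
  | cs, s :: rest => ∃ j : Nat, s <+: cs.drop j ∧ pvOrdered ((cs.drop j).drop s.length) rest

theorem pvOrdered_mono (subs : List (List Char)) (cs : List Char) (k : Nat)
    (h : pvOrdered (cs.drop k) subs) : pvOrdered cs subs := by
  cases subs with
  | nil => trivial
  | cons s rest =>
    obtain ⟨j, h1, h2⟩ := h
    refine ⟨k + j, ?_, ?_⟩
    · simpa [List.drop_drop] using h1
    · simpa [List.drop_drop, Nat.add_assoc] using h2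

theorem pvReSearchLits_iff (text : List Char) (lits : List (List Char)) :
    pvReSearchLits text lits = true ↔ pvOrdered text lits := by
  fun_induction pvReSearchLits text lits with
  | case1 => simp [pvOrdered]
  | case2 lit rest ih =>
    constructor
    · intro h
      simp only [Bool.and_eq_true] at h
      obtain ⟨hp, hb⟩ := h
      refine ⟨0, ?_, ?_⟩
      · simpa using List.isPrefixOf_iff_prefix.mp hp
      · simpa using ih.mp hb
    · intro h
      obtain ⟨j, hpre, hord⟩ := h
      simp only [Bool.and_eq_true]
      have hnil : lit <+: ([] : List Char) := by simpa using hpre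
      refine ⟨List.isPrefixOf_iff_prefix.mpr hnil, ih.mpr ?_⟩
      simpa using hord
  | case3 lit rest c t ih1 ih2 =>
    constructor
    · intro h
      simp only [Bool.or_eq_true, Bool.and_eq_true] at h
      rcases h with ⟨hp, hb⟩ | hadv
      · refine ⟨0, ?_, ?_⟩
        · simpa using List.isPrefixOf_iff_prefix.mp hp
        · simpa using ih1.mp hb
      · exact pvOrdered_mono _ (c :: t) 1 (by simpa using ih2.mp hadv)
    · intro h
      obtain ⟨j, hpre, hord⟩ := h
      simp only [Bool.or_eq_true, Bool.and_eq_true]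
      match j, hpre, hord with
      | 0, hpre, hord =>
        left
        refine ⟨List.isPrefixOf_iff_prefix.mpr (by simpa using hpre), ih1.mpr ?_⟩
        simpa using hord
      | j' + 1, hpre, hord =>
        right
        exact ih2.mpr ⟨j', by simpa using hpre, by simpa using hord⟩

theorem pvALoop_iff (subs : List String) (s : String) (k : Nat) (hk : k ≤ s.toList.length) :
    pvALoop s subs (k : Int) = true ↔ pvOrdered (s.toList.drop k) (subs.map String.toList) := by
  induction subs generalizing k with
  | nil => simp [pvALoop, pvOrdered]
  | cons sub rest ih =>
    rw [pvALoop]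
    simp only [PySem.Str.findFrom_eq]
    rw [PySem.Chars.findFrom_natCast s.toList sub.toList k hk]
    by_cases hfind : PySem.Chars.find (s.toList.drop k) sub.toList = -1
    · rw [if_pos hfind, if_pos rfl]
      constructor
      · intro h; simp at h
      · intro h
        obtain ⟨j, hpre, -⟩ := h
        have hin : PySem.Chars.isIn sub.toList (s.toList.drop k) = true :=
          (PySem.Chars.exists_prefix_drop_iff_isIn sub.toList (s.toList.drop k)).mp ⟨j, hpre⟩
        exact absurd ((PySem.Chars.isIn_iff_infix _ _).mp hin)
          ((PySem.Chars.find_eq_neg_one_iff _ _).mp hfind)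
    · rw [if_neg hfind]
      have hge := PySem.Chars.neg_one_le_find (s.toList.drop k) sub.toList
      have hne : (k : Int) + PySem.Chars.find (s.toList.drop k) sub.toList ≠ -1 := by omega
      rw [if_neg hne]
      set f := PySem.Chars.find (s.toList.drop k) sub.toList with hf
      have hf0 : (0 : Int) ≤ f := by omega
      obtain ⟨hpre, hmin⟩ := PySem.Chars.find_spec (s := s.toList.drop k) (sub := sub.toList) hf0
      have hsublen : sub.toList.length ≤ ((s.toList.drop k).drop f.toNat).length :=
        hpre.length_le
      rw [List.length_drop, List.length_drop] at hsublen
      have hflen : f ≤ ((s.toList.drop k).length : Int) := PySem.Chars.find_le_length _ _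
      rw [List.length_drop] at hflen
      have hk' : k + f.toNat + sub.toList.length ≤ s.toList.length := by omega
      have hlen : (PySem.Str.len sub : Int) = (sub.toList.length : Int) := by
        simp [PySem.Str.len]
      have hcast : (k : Int) + f + (PySem.Str.len sub : Int) =
          ((k + f.toNat + sub.toList.length : Nat) : Int) := by
        rw [hlen]; push_cast; omega
      rw [hcast, ih _ hk']
      constructor
      · intro h
        refine ⟨f.toNat, hpre, ?_⟩
        simpa [List.drop_drop, Nat.add_assoc] using h
      · intro h
        obtain ⟨j, hj, hord⟩ := h
        have hfj : f.toNat ≤ j := by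
          by_contra hlt
          exact hmin j (by omega) hj
        apply pvOrdered_mono (rest.map String.toList)
          (s.toList.drop (k + f.toNat + sub.toList.length)) (j - f.toNat)
        rw [List.drop_drop]
        have e : k + f.toNat + sub.toList.length + (j - f.toNat) =
            k + (j + sub.toList.length) := by omega
        rw [e]
        simpa [List.drop_drop, Nat.add_assoc] using hord

theorem pv_bool_eq {a b : Bool} (h : (a = true) ↔ (b = true)) : a = b := by
  cases a <;> cases b <;> simp_all

-- ===== VERDICT (by name: the statement is the Claim_ definition above) =====
theorem contains_ordered_substrings_py_spec : Claim_equal_contains_ordered_substrings_py := by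
  intro string subs _
  unfold Spec_contains_ordered_substrings_py contains_ordered_substrings_py contains_ordered_substrings_py_alt
  apply pv_bool_eq
  have h0 : (0 : Int) = ((0 : Nat) : Int) := rfl
  rw [h0, pvALoop_iff subs string 0 (Nat.zero_le _), pvReSearchLits_iff]
  simp
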